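-- pv_equiv track=rewrite | github.com/wookkl/programmers-problemsolving | 종이접기.py | rev
-- ===== SOURCE A (Python) =====
-- def rev(l):
--     for i in range(len(l)):
--         if l[i] == 0 :
--             l[i]=1
--         else:
--             l[i]=0
--     l.reverse()
--     return l
-- ===== SOURCE B (Python) =====
-- def rev(l):
--     # Two-pointer in-place pass: swap-and-flip from both ends at once,
--     # fusing the elementwise flip and the reverse into one traversal.
--     i, j = 0, len(l) - 1
--     while i < j:
--         a, b = l[i], l[j]
--         l[i] = 1 if b == 0 else 0
--         l[j] = 1 if a == 0 else 0
--         i += 1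
--         j -= 1
--     if i == j:
--         l[i] = 1 if l[i] == 0 else 0
--     return l
-- ===== Notes on version B (the rewrite author's own statement) =====
-- stated objective: alternative
-- what changed: Replaces A's two phases (a full flip loop over all indices followed by l.reverse()) with a single fused two-pointer pass that swaps and flips elements from both ends in one traversal.
import Mathlib
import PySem

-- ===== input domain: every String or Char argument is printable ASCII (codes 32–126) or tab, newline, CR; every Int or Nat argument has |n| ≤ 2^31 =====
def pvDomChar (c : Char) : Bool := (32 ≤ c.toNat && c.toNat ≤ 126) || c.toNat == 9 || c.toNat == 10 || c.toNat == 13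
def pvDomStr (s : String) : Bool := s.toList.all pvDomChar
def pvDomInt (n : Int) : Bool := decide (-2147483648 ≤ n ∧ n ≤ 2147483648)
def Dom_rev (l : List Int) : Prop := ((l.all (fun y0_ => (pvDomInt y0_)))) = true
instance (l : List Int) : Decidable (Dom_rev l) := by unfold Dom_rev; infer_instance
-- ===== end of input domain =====

-- B fuses A's flip loop + l.reverse() into one two-pointer pass from both ends (alternative decomposition, same cost).
-- Both A and B mutate the argument list in place in Python; the equivalence proved here is about the return value.


-- the flip rule shared by both sources: 1 if x == 0 else 0
def pyFlip (x : Int) : Int := if x = 0 then 1 else 0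

-- ===== PORT A =====
-- A's for-loop sets l[i] to the flip of l[i] for every index (an elementwise map), then calls l.reverse().
def rev (l : List Int) : List Int := (l.map pyFlip).reverse

-- ===== PORT B =====
-- B's two-pointer in-place step "flip-and-swap the two ends, move inward" is rendered purely as
-- peeling both ends of the list per recursive step; the i == j leftover is the singleton case.
def revAltGo : List Int → List Int
  | [] => []
  | [x] => [pyFlip x]
  | x :: y :: ys =>
      pyFlip ((y :: ys).getLast (by simp)) :: (revAltGo ((y :: ys).dropLast) ++ [pyFlip x])
termination_by l => l.length
decreasing_by simp

def rev_alt (l : List Int) : List Int := revAltGo l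

-- ===== PRECONDITION & SPEC =====
def Spec_rev (l : List Int) (out : List Int) : Prop := out = rev_alt l
instance (l : List Int) (out : List Int) : Decidable (Spec_rev l out) := by unfold Spec_rev; infer_instance

-- ===== CLAIM (what is proved, stated in full; the proofs are below) =====
def Claim_equal_rev : Prop := ∀ (l : List Int), Dom_rev l → Spec_rev l (rev l)

-- ===== LEMMAS AND PROOFS =====
theorem revAltGo_eq : ∀ (n : Nat) (l : List Int), l.length ≤ n → revAltGo l = (l.map pyFlip).reverse := by
  intro n
  induction n with
  | zero =>
    intro l hl
    have : l = [] := List.eq_nil_of_length_eq_zero (Nat.le_zero.mp hl)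
    subst this; simp [revAltGo]
  | succ n ih =>
    intro l hl
    match l with
    | [] => simp [revAltGo]
    | [x] => simp [revAltGo]
    | x :: y :: ys =>
      have hsplit : (y :: ys).dropLast ++ [(y :: ys).getLast (by simp)] = y :: ys :=
        List.dropLast_append_getLast (by simp)
      have hlen : ((y :: ys).dropLast).length ≤ n := by
        simp at hl ⊢; omega
      rw [revAltGo, ih _ hlen]
      conv_rhs => rw [show (x :: y :: ys) = x :: ((y :: ys).dropLast ++ [(y :: ys).getLast (by simp)]) from by rw [hsplit]]
      simp

-- ===== VERDICT (by name: the statement is the Claim_ definition above) =====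
theorem rev_spec : Claim_equal_rev := by
  intro l _
  show rev l = rev_alt l
  rw [rev, rev_alt, revAltGo_eq l.length l (le_refl _)]
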